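-- pv_equiv track=rewrite | github.com/ramprasadre56/gemma-cookbook | heartyculturenursery/extract_philodendron.py | cluster_by_row
-- ===== SOURCE A (Python) =====
-- def cluster_by_row(items, y_key='y', threshold=60):
--     """Group items into rows based on Y position clustering"""
--     if not items:
--         return []
--
--     sorted_items = sorted(items, key=lambda x: x[y_key])
--
--     rows = []
--     current_row = [sorted_items[0]]
--
--     for item in sorted_items[1:]:
--         if item[y_key] - current_row[-1][y_key] < threshold:
--             current_row.append(item)
--         else:
--             rows.append(current_row)
--             current_row = [item]
--
--     rows.append(current_row)
--
--     for row in rows: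
--         row.sort(key=lambda x: x['x'])
--
--     return rows
-- ===== SOURCE B (Python) =====
-- def cluster_by_row(items, y_key='y', threshold=60):
--     """Group items into rows based on Y position clustering"""
--     # Pass 1: label each y-sorted item with its row id (prefix count of big gaps).
--     labelled = []
--     rid = 0
--     prev = None
--     for d in sorted(items, key=lambda d: d[y_key]):
--         if prev is not None and d[y_key] - prev >= threshold:
--             rid += 1
--         labelled.append((rid, d))
--         prev = d[y_key]
--     # Pass 2: ONE global sort by the composite key (row id, x) replaces per-row sorts.
--     ordered = sorted(labelled, key=lambda p: (p[0], p[1]['x']))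
--     # Pass 3: rebuild the rows by splitting on the row id.
--     rows = []
--     for r, d in ordered:
--         if r == len(rows):
--             rows.append([d])
--         else:
--             rows[-1].append(d)
--     return rows
-- ===== Notes on version B (the rewrite author's own statement) =====
-- stated objective: alternative
-- what changed: Instead of A's accumulator loop that grows rows and then sorts each row separately, B labels each y-sorted item with a row id in one pass, performs ONE global sort by the composite key (row id, x) in place of the per-row x-sorts, and rebuilds the rows by splitting the globally sorted list on the row id.
import Mathlib
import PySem

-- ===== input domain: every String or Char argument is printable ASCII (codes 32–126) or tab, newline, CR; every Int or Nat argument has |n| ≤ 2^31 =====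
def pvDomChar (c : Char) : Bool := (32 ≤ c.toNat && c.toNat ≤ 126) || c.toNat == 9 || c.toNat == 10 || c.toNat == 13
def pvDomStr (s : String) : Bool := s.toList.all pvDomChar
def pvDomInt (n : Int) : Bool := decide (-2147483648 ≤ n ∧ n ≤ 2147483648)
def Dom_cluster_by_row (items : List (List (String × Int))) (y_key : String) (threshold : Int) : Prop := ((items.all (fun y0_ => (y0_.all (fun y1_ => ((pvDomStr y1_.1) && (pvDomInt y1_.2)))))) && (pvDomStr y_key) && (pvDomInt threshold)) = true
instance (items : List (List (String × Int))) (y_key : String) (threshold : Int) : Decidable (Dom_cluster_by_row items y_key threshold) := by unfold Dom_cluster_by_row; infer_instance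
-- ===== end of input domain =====

-- B replaces A's grow-a-row accumulator loop + per-row x-sorts by: label each y-sorted item with
-- a row id in one pass, ONE global sort by the composite key (row id, x), then rebuild the rows
-- by splitting on the row id; objective: alternative algorithm, same asymptotic cost.

-- ===== PORT A =====
-- d[k]: first-match association lookup; Pre_ guarantees the key is present (default never used)
def pvGetKey (d : List (String × Int)) (k : String) : Int :=
  (((d.find? (fun p => p.1 == k)).map (fun p => p.2)).getD 0)

-- the loop body of A's for-loop, as a named helper
def pvStep (y : String) (t : Int)
    (st : List (List (List (String × Int))) × List (List (String × Int)))
    (item : List (String × Int)) :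
    List (List (List (String × Int))) × List (List (String × Int)) :=
  if pvGetKey item y - pvGetKey (PySem.List.pyGetD st.2 (-1) []) y < t then
    (st.1, st.2 ++ [item])
  else
    (st.1 ++ [st.2], [item])

def cluster_by_row (items : List (List (String × Int))) (y_key : String) (threshold : Int) :
    List (List (List (String × Int))) :=
  if items = [] then []
  else
    let sorted_items := PySem.List.sorted items (fun d => pvGetKey d y_key)
    let st := (PySem.List.slice sorted_items (some 1) none).foldl (pvStep y_key threshold)
      (([] : List (List (List (String × Int)))), [PySem.List.pyGetD sorted_items 0 []])
    let rows := st.1 ++ [st.2]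
    rows.map (fun row => PySem.List.sorted row (fun d => pvGetKey d "x"))

-- ===== PORT B =====
-- pass 1 loop body: running row id, previous y, labelled output list
def pvLabStep (y : String) (t : Int)
    (st : Int × Option Int × List (Int × List (String × Int)))
    (d : List (String × Int)) : Int × Option Int × List (Int × List (String × Int)) :=
  let rid := match st.2.1 with
    | none => st.1
    | some p => if t ≤ pvGetKey d y - p then st.1 + 1 else st.1
  (rid, some (pvGetKey d y), st.2.2 ++ [(rid, d)])

-- pass 3 loop body: 'rows.append([d])' vs 'rows[-1].append(d)'
def pvBuildStep (rows : List (List (List (String × Int)))) (rd : Int × List (String × Int)) :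
    List (List (List (String × Int))) :=
  if rd.1 = (rows.length : Int) then rows ++ [[rd.2]]
  else rows.dropLast ++ [PySem.List.pyGetD rows (-1) [] ++ [rd.2]]

def cluster_by_row_alt (items : List (List (String × Int))) (y_key : String) (threshold : Int) :
    List (List (List (String × Int))) :=
  let labelled := (PySem.List.sorted items (fun d => pvGetKey d y_key)).foldl
    (pvLabStep y_key threshold) (0, none, [])
  let ordered := PySem.List.sorted2 labelled.2.2 (fun p => p.1) (fun p => pvGetKey p.2 "x")
  ordered.foldl pvBuildStep []

-- ===== PRECONDITION & SPEC =====
-- Pre_: every item carries both keys; on any other nonempty input Python A raises KeyError.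
def Pre_cluster_by_row (items : List (List (String × Int))) (y_key : String) (threshold : Int) : Prop :=
  ∀ d ∈ items, (d.map Prod.fst).contains y_key = true ∧ (d.map Prod.fst).contains "x" = true
instance (items : List (List (String × Int))) (y_key : String) (threshold : Int) : Decidable (Pre_cluster_by_row items y_key threshold) := by unfold Pre_cluster_by_row; infer_instance

def pvWitness_cluster_by_row : (List (List (String × Int))) × String × Int :=
  ([[("x", 1), ("y", 2)], [("x", 0), ("y", 90)]], "y", 60)

def Spec_cluster_by_row (items : List (List (String × Int))) (y_key : String) (threshold : Int) (out : List (List (List (String × Int)))) : Prop := out = cluster_by_row_alt items y_key threshold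
instance (items : List (List (String × Int))) (y_key : String) (threshold : Int) (out : List (List (List (String × Int)))) : Decidable (Spec_cluster_by_row items y_key threshold out) := by unfold Spec_cluster_by_row; infer_instance

-- ===== CLAIM (what is proved, stated in full; the proofs are below) =====
def Claim_equal_cluster_by_row : Prop := ∀ (items : List (List (String × Int))) (y_key : String) (threshold : Int), Dom_cluster_by_row items y_key threshold → Pre_cluster_by_row items y_key threshold → Spec_cluster_by_row items y_key threshold (cluster_by_row items y_key threshold)

-- ===== LEMMAS AND PROOFS =====

-- A's loop, rows accumulator dropped: returns (finished rows, current row)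
def pvG (y : String) (t : Int) :
    List (List (String × Int)) → List (List (String × Int)) →
    List (List (List (String × Int))) × List (List (String × Int))
  | cur, [] => ([], cur)
  | cur, x :: xs =>
    if pvGetKey x y - pvGetKey (PySem.List.pyGetD cur (-1) []) y < t then
      pvG y t (cur ++ [x]) xs
    else
      ((cur :: (pvG y t [x] xs).1), (pvG y t [x] xs).2)

-- A's grouping: the finished rows plus the final current row
def pvR (y : String) (t : Int) (cur : List (List (String × Int))) (xs : List (List (String × Int))) :
    List (List (List (String × Int))) :=
  (pvG y t cur xs).1 ++ [(pvG y t cur xs).2]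

lemma pvG_foldl (y : String) (t : Int) (xs : List (List (String × Int))) :
    ∀ rows cur, xs.foldl (pvStep y t) (rows, cur) =
      (rows ++ (pvG y t cur xs).1, (pvG y t cur xs).2) := by
  induction xs with
  | nil => intro rows cur; simp [pvG]
  | cons x xs ih =>
    intro rows cur
    by_cases h : pvGetKey x y - pvGetKey (PySem.List.pyGetD cur (-1) []) y < t
    · simp [pvStep, pvG, h, ih]
    · simp [pvStep, pvG, h, ih]

lemma pvR_cons (y : String) (t : Int) (cur : List (List (String × Int)))
    (x : List (String × Int)) (xs : List (List (String × Int))) :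
    pvR y t cur (x :: xs) =
      if pvGetKey x y - pvGetKey (PySem.List.pyGetD cur (-1) []) y < t then
        pvR y t (cur ++ [x]) xs
      else
        cur :: pvR y t [x] xs := by
  simp only [pvR, pvG]
  split <;> simp

lemma pvR_ne_nil (y : String) (t : Int) (xs : List (List (String × Int))) :
    ∀ cur, cur ≠ [] → ∀ r ∈ pvR y t cur xs, r ≠ [] := by
  induction xs with
  | nil => intro cur hc r hr; simp [pvR, pvG] at hr; simpa [hr]
  | cons x xs ih =>
    intro cur hc r hr
    rw [pvR_cons] at hr
    split at hr
    · exact ih (cur ++ [x]) (by simp) r hr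
    · rcases List.mem_cons.mp hr with h | h
      · simpa [h]
      · exact ih [x] (by simp) r h

-- B's pass-1 loop, list accumulator dropped
def pvL (y : String) (t : Int) :
    Int → Option Int → List (List (String × Int)) → List (Int × List (String × Int))
  | _, _, [] => []
  | rid, prev, x :: xs =>
    let rid' := match prev with
      | none => rid
      | some p => if t ≤ pvGetKey x y - p then rid + 1 else rid
    (rid', x) :: pvL y t rid' (some (pvGetKey x y)) xs

lemma pvLabStep_foldl (y : String) (t : Int) (xs : List (List (String × Int))) :
    ∀ rid prev acc, (xs.foldl (pvLabStep y t) (rid, prev, acc)).2.2 =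
      acc ++ pvL y t rid prev xs := by
  induction xs with
  | nil => intro rid prev acc; simp [pvL]
  | cons x xs ih =>
    intro rid prev acc
    cases prev with
    | none => simp [pvLabStep, pvL, ih]
    | some p =>
      by_cases h : t ≤ pvGetKey x y - p
      · simp [pvLabStep, pvL, h, ih]
      · simp [pvLabStep, pvL, h, ih]

-- reference labelling of a list of rows with consecutive row ids
def labelOf : List (List (List (String × Int))) → Int → List (Int × List (String × Int))
  | [], _ => []
  | r :: rs, rid => r.map (fun d => (rid, d)) ++ labelOf rs (rid + 1)

lemma labelOf_pvR (y : String) (t : Int) (xs : List (List (String × Int))) :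
    ∀ cur rid, cur ≠ [] →
      labelOf (pvR y t cur xs) rid =
        cur.map (fun d => (rid, d)) ++
          pvL y t rid (some (pvGetKey (PySem.List.pyGetD cur (-1) []) y)) xs := by
  induction xs with
  | nil => intro cur rid _; simp [pvR, pvG, labelOf, pvL]
  | cons x xs ih =>
    intro cur rid hc
    rw [pvR_cons]
    by_cases h : pvGetKey x y - pvGetKey (PySem.List.pyGetD cur (-1) []) y < t
    · rw [if_pos h]
      have hlast : PySem.List.pyGetD (cur ++ [x]) (-1) [] = x := by
        rw [PySem.List.pyGetD_neg_one _ _ (by simp)]; simp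
      rw [ih (cur ++ [x]) rid (by simp), hlast]
      simp [pvL, if_neg (by omega : ¬ t ≤ pvGetKey x y - pvGetKey (PySem.List.pyGetD cur (-1) []) y)]
    · rw [if_neg h]
      have hlast : PySem.List.pyGetD [x] (-1) [] = x := by
        rw [PySem.List.pyGetD_neg_one _ _ (by simp)]; simp
      rw [labelOf, ih [x] (rid + 1) (by simp), hlast]
      simp [pvL, if_pos (by omega : t ≤ pvGetKey x y - pvGetKey (PySem.List.pyGetD cur (-1) []) y)]

lemma mem_labelOf_fst_ge (rs : List (List (List (String × Int)))) :
    ∀ rid p, p ∈ labelOf rs rid → rid ≤ p.1 := by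
  induction rs with
  | nil => intro rid p hp; simp [labelOf] at hp
  | cons r rs ih =>
    intro rid p hp
    rcases List.mem_append.mp hp with h | h
    · rcases List.mem_map.mp h with ⟨d, _, rfl⟩; simp
    · have := ih (rid + 1) p h; omega

-- generic insertion-sort facts used to split the single composite sort into per-row sorts
lemma insertBy_append_left {α : Type} (before : α → α → Bool) (x : α) (l1 l2 : List α)
    (h : ∀ a ∈ l1, before x a = false) :
    PySem.List.insertBy before x (l1 ++ l2) = l1 ++ PySem.List.insertBy before x l2 := by
  induction l1 with
  | nil => simp
  | cons a l1 ih =>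
    simp only [List.cons_append, PySem.List.insertBy, h a (by simp)]
    simp only [Bool.false_eq_true, if_false, List.cons.injEq, true_and]
    exact ih (fun b hb => h b (by simp [hb]))

lemma foldl_insertBy_append {α : Type} (before : α → α → Bool) (l2 : List α) :
    ∀ (l1 acc : List α), (∀ a ∈ l1, ∀ b ∈ l2, before b a = false) →
      l2.foldl (fun acc x => PySem.List.insertBy before x acc) (l1 ++ acc) =
        l1 ++ l2.foldl (fun acc x => PySem.List.insertBy before x acc) acc := by
  induction l2 with
  | nil => intro l1 acc _; simp
  | cons b l2 ih =>
    intro l1 acc h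
    simp only [List.foldl_cons]
    rw [insertBy_append_left before b l1 acc (fun a ha => h a ha b (by simp))]
    exact ih l1 _ (fun a ha c hc => h a ha c (by simp [hc]))

lemma insertBy_map {α β : Type} (before1 : α → α → Bool) (before2 : β → β → Bool) (f : α → β)
    (hb : ∀ a b, before2 (f a) (f b) = before1 a b) (x : α) (l : List α) :
    PySem.List.insertBy before2 (f x) (l.map f) = (PySem.List.insertBy before1 x l).map f := by
  induction l with
  | nil => simp [PySem.List.insertBy]
  | cons a l ih =>
    simp only [List.map_cons, PySem.List.insertBy, hb]
    by_cases h : before1 x a = true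
    · simp [h]
    · simp only [h]
      simp [ih]

lemma foldl_insertBy_map {α β : Type} (before1 : α → α → Bool) (before2 : β → β → Bool) (f : α → β)
    (hb : ∀ a b, before2 (f a) (f b) = before1 a b) (l : List α) :
    ∀ acc : List α,
      (l.map f).foldl (fun acc x => PySem.List.insertBy before2 x acc) (acc.map f) =
        (l.foldl (fun acc x => PySem.List.insertBy before1 x acc) acc).map f := by
  induction l with
  | nil => intro acc; simp
  | cons a l ih =>
    intro acc
    simp only [List.map_cons, List.foldl_cons]
    rw [insertBy_map before1 before2 f hb a acc]
    exact ih _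

-- the composite comparator B's global sort uses, and the x-only comparator of the per-row sorts
def pvLt2 (a b : Int × List (String × Int)) : Bool :=
  decide (a.1 < b.1) || (!decide (b.1 < a.1) && decide (pvGetKey a.2 "x" < pvGetKey b.2 "x"))

def pvLtX (a b : List (String × Int)) : Bool := decide (pvGetKey a "x" < pvGetKey b "x")

lemma sorted2_eq_foldl (l : List (Int × List (String × Int))) :
    PySem.List.sorted2 l (fun p => p.1) (fun p => pvGetKey p.2 "x") =
      l.foldl (fun acc x => PySem.List.insertBy pvLt2 x acc) [] := rfl

lemma sortx_eq_foldl (r : List (List (String × Int))) :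
    PySem.List.sorted r (fun d => pvGetKey d "x") =
      r.foldl (fun acc x => PySem.List.insertBy pvLtX x acc) [] := rfl

-- the single composite sort of a labelled row list = the per-row x-sorts, labels kept
lemma sorted2_labelOf (rs : List (List (List (String × Int)))) :
    ∀ rid, PySem.List.sorted2 (labelOf rs rid) (fun p => p.1) (fun p => pvGetKey p.2 "x") =
      labelOf (rs.map (fun r => PySem.List.sorted r (fun d => pvGetKey d "x"))) rid := by
  induction rs with
  | nil => intro rid; rfl
  | cons r rs ih =>
    intro rid
    rw [sorted2_eq_foldl, labelOf, List.foldl_append]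
    have h1 : (r.map (fun d => (rid, d))).foldl
        (fun acc x => PySem.List.insertBy pvLt2 x acc) ([] : List (Int × List (String × Int))) =
        (PySem.List.sorted r (fun d => pvGetKey d "x")).map (fun d => (rid, d)) := by
      have := foldl_insertBy_map pvLtX pvLt2 (fun d => (rid, d))
        (by intro a b; simp [pvLt2, pvLtX]) r []
      simpa [sortx_eq_foldl] using this
    rw [h1]
    have h2 : (labelOf rs (rid + 1)).foldl (fun acc x => PySem.List.insertBy pvLt2 x acc)
          ((PySem.List.sorted r (fun d => pvGetKey d "x")).map (fun d => (rid, d)) ++ []) =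
        (PySem.List.sorted r (fun d => pvGetKey d "x")).map (fun d => (rid, d)) ++
          (labelOf rs (rid + 1)).foldl (fun acc x => PySem.List.insertBy pvLt2 x acc) [] := by
      apply foldl_insertBy_append
      intro a ha b hb
      rcases List.mem_map.mp ha with ⟨d, _, rfl⟩
      have hbge : rid + 1 ≤ b.1 := mem_labelOf_fst_ge rs (rid + 1) b hb
      simp only [pvLt2]
      simp only [Bool.or_eq_false_iff, decide_eq_false_iff_not, not_lt,
        Bool.and_eq_false_iff, Bool.not_eq_false', decide_eq_true_eq]
      constructor
      · omega
      · left; omega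
    simp only [List.append_nil] at h2 ⊢
    rw [h2, ← sorted2_eq_foldl, ih (rid + 1)]
    simp [labelOf]

-- pass 3: within one row the id never equals len(rows), so items append to rows[-1]
lemma pvBuild_inner (r' : List (List (String × Int))) :
    ∀ (rows0 : List (List (List (String × Int)))) (cur : List (List (String × Int))),
      (r'.map (fun d => ((rows0.length : Int), d))).foldl pvBuildStep (rows0 ++ [cur]) =
        rows0 ++ [cur ++ r'] := by
  induction r' with
  | nil => intro rows0 cur; simp
  | cons d r' ih =>
    intro rows0 cur
    simp only [List.map_cons, List.foldl_cons]
    have hstep : pvBuildStep (rows0 ++ [cur]) ((rows0.length : Int), d) =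
        rows0 ++ [cur ++ [d]] := by
      have hne : ¬ ((rows0.length : Int) = (((rows0 ++ [cur]).length : Nat) : Int)) := by
        simp
      simp only [pvBuildStep, hne, if_false]
      rw [PySem.List.pyGetD_neg_one _ _ (by simp)]
      simp
    rw [hstep, ih rows0 (cur ++ [d])]
    simp

-- pass 3: rebuilding from the labelled flat list recovers exactly the rows
lemma pvBuild_outer (rs : List (List (List (String × Int)))) :
    ∀ rows0 : List (List (List (String × Int))), (∀ r ∈ rs, r ≠ []) →
      (labelOf rs (rows0.length : Int)).foldl pvBuildStep rows0 = rows0 ++ rs := by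
  induction rs with
  | nil => intro rows0 _; simp [labelOf]
  | cons r rs ih =>
    intro rows0 h
    cases hr : r with
    | nil => exact absurd hr (h r (by simp))
    | cons d r' =>
      simp only [labelOf, List.map_cons, List.foldl_append, List.foldl_cons]
      have hstep : pvBuildStep rows0 ((rows0.length : Int), d) = rows0 ++ [[d]] := by
        simp [pvBuildStep]
      rw [hstep, pvBuild_inner r' rows0 [d]]
      have hlen : ((rows0.length : Nat) : Int) + 1 = (((rows0 ++ [[d] ++ r']).length : Nat) : Int) := by
        simp
      rw [hlen, ih (rows0 ++ [[d] ++ r']) (fun q hq => h q (by simp [hq]))]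
      simp

-- ===== VERDICT (by name: the statement is the Claim_ definition above) =====
theorem cluster_by_row_spec : Claim_equal_cluster_by_row := by
  intro items y t _hdom _hpre
  unfold Spec_cluster_by_row
  by_cases hnil : items = []
  · simp [cluster_by_row, cluster_by_row_alt, hnil, PySem.List.sorted, PySem.List.sorted2]
  · have hsne : PySem.List.sorted items (fun d => pvGetKey d y) ≠ [] := by
      intro h
      exact hnil ((PySem.List.sorted_eq_nil_iff items _ _).mp h)
    set s := PySem.List.sorted items (fun d => pvGetKey d y) with hs
    obtain ⟨x0, tl, hsl⟩ := List.exists_cons_of_ne_nil hsne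
    -- A's side: rows = pvR [s0] (s.drop 1)
    have hA : cluster_by_row items y t =
        (pvR y t [x0] tl).map (fun row => PySem.List.sorted row (fun d => pvGetKey d "x")) := by
      simp only [cluster_by_row, if_neg hnil, ← hs, hsl, PySem.List.slice_from_one]
      rw [PySem.List.pyGetD_zero]
      simp only [List.getD_cons_zero]
      simp only [List.tail_cons]
      rw [pvG_foldl]
      simp [pvR]
    -- B's side: labelled = labelOf (pvR [x0] tl) 0
    have hlab : ((x0 :: tl).foldl (pvLabStep y t) (0, none, [])).2.2 =
        labelOf (pvR y t [x0] tl) 0 := by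
      rw [pvLabStep_foldl, labelOf_pvR y t tl [x0] 0 (by simp)]
      rw [PySem.List.pyGetD_neg_one _ _ (by simp)]
      simp [pvL]
    have hB : cluster_by_row_alt items y t =
        (labelOf ((pvR y t [x0] tl).map
            (fun r => PySem.List.sorted r (fun d => pvGetKey d "x"))) 0).foldl pvBuildStep [] := by
      simp only [cluster_by_row_alt, ← hs, hsl]
      rw [hlab, sorted2_labelOf]
    rw [hA, hB]
    have hz : ((0 : Int)) = ((([] : List (List (List (String × Int)))).length : Nat) : Int) := by simp
    rw [hz, pvBuild_outer]
    · simp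
    · intro r hr
      rcases List.mem_map.mp hr with ⟨q, hq, rfl⟩
      intro hcon
      exact pvR_ne_nil y t tl [x0] (by simp) q hq ((PySem.List.sorted_eq_nil_iff q _ _).mp hcon)
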